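-- pv_equiv track=rewrite | github.com/Iftikhar-hasan12/Data_communication | Lab_manual_03/com-122.py | ToEncode
-- ===== SOURCE A (Python) =====
-- def ToEncode(data):
--     signal =[]
--     result =[]
--     for i in data:
--         if(i=='1'):
--             result.append(1)
--             signal.append(1)
--         else:
--             result.append(0)
--             signal.append(-1)
--     return  result, signal
-- ===== SOURCE B (Python) =====
-- def ToEncode(data):
--     # Divide and conquer: split the string in half, encode each half
--     # recursively, and concatenate; a single character is the base case,
--     # with the signal level derived arithmetically as 2*b - 1.
--     if len(data) == 0:
--         return [], []
--     if len(data) == 1: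
--         b = 1 if data == '1' else 0
--         return [b], [2 * b - 1]
--     mid = len(data) // 2
--     r1, s1 = ToEncode(data[:mid])
--     r2, s2 = ToEncode(data[mid:])
--     return r1 + r2, s1 + s2
-- ===== Notes on version B (the rewrite author's own statement) =====
-- stated objective: alternative
-- what changed: Replaces A's single left-to-right loop that branches per character and appends to both lists with a divide-and-conquer recursion: the string is split in halves, each half encoded recursively and the results concatenated, and at the single-character base case the signal level is derived arithmetically as 2*b-1 instead of by a second branch.
import Mathlib
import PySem

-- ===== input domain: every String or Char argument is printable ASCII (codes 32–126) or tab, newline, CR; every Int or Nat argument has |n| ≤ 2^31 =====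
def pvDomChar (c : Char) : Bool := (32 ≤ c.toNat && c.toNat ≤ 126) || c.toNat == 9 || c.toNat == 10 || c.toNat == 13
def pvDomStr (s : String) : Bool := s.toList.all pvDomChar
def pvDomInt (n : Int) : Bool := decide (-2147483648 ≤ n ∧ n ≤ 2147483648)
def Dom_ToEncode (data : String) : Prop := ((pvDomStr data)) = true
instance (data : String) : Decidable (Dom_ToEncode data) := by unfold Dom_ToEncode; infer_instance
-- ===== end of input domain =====

-- B replaces A's single branching append-loop by a divide-and-conquer recursion on string halves,
-- deriving the signal level arithmetically as 2*b-1 at the base case (objective: alternative).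

-- ===== PORT A =====
-- A: one loop over the characters, appending to both result and signal in each branch.
def ToEncode (data : String) : List Int × List Int :=
  let st := data.toList.foldl
    (fun (acc : List Int × List Int) i =>
      if i = '1' then (acc.1 ++ [1], acc.2 ++ [1])
      else (acc.1 ++ [0], acc.2 ++ [-1]))
    ([], [])
  (st.1, st.2)

-- ===== PORT B =====
-- B's recursion on the character list; data[:mid] / data[mid:] with 0 ≤ mid ≤ len are exactly
-- List.take mid / List.drop mid (Python slice with in-range nonnegative bounds; exact here).
def ToEncodeAltGo : List Char → List Int × List Int
  | [] => ([], [])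
  | [c] =>
    let b : Int := if c = '1' then 1 else 0
    ([b], [2 * b - 1])
  | c1 :: c2 :: rest =>
    let l := c1 :: c2 :: rest
    let mid := l.length / 2   -- len(l) // 2: Nat division of nonnegative values = Python //
    let p1 := ToEncodeAltGo (l.take mid)
    let p2 := ToEncodeAltGo (l.drop mid)
    (p1.1 ++ p2.1, p1.2 ++ p2.2)
termination_by l => l.length
decreasing_by
  · simp; omega
  · simp; omega

def ToEncode_alt (data : String) : List Int × List Int :=
  ToEncodeAltGo data.toList

-- ===== PRECONDITION & SPEC =====
def Spec_ToEncode (data : String) (out : List Int × List Int) : Prop := out = ToEncode_alt data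
instance (data : String) (out : List Int × List Int) : Decidable (Spec_ToEncode data out) := by unfold Spec_ToEncode; infer_instance

-- ===== CLAIM (what is proved, stated in full; the proofs are below) =====
def Claim_equal_ToEncode : Prop := ∀ (data : String), Dom_ToEncode data → Spec_ToEncode data (ToEncode data)

-- ===== LEMMAS AND PROOFS =====
theorem ToEncodeAltGo_eq_map (l : List Char) :
    ToEncodeAltGo l
      = (l.map (fun c => if c = '1' then (1 : Int) else 0),
         l.map (fun c => if c = '1' then (1 : Int) else (-1))) := by
  induction l using ToEncodeAltGo.induct with
  | case1 => simp [ToEncodeAltGo]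
  | case2 c =>
    by_cases h : c = '1' <;> simp [ToEncodeAltGo, h]
  | case3 c1 c2 rest l mid ih1 ih2 =>
    subst l; subst mid
    rw [ToEncodeAltGo, ih1, ih2]
    simp

theorem ToEncode_foldl_inv (l : List Char) (r s : List Int) :
    l.foldl
      (fun (acc : List Int × List Int) i =>
        if i = '1' then (acc.1 ++ [1], acc.2 ++ [1])
        else (acc.1 ++ [0], acc.2 ++ [-1]))
      (r, s)
    = (r ++ l.map (fun c => if c = '1' then (1 : Int) else 0),
       s ++ l.map (fun c => if c = '1' then (1 : Int) else (-1))) := by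
  induction l generalizing r s with
  | nil => simp
  | cons c t ih =>
    by_cases h : c = '1' <;> simp [h, ih]

-- ===== VERDICT (by name: the statement is the Claim_ definition above) =====
theorem ToEncode_spec : Claim_equal_ToEncode := by
  intro data _
  unfold Spec_ToEncode ToEncode ToEncode_alt
  simp [ToEncode_foldl_inv, ToEncodeAltGo_eq_map]
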